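-- pv_equiv track=rewrite | github.com/clayelmore/Kaprekar-60714 | scripts/verify_60714_ladder.py | pi_to_letter_string
-- ===== SOURCE A (Python) =====
-- def pi_to_letter_string(pi, d):
--     """Return the letter string for pi: reading from highest place to lowest."""
--     if d <= 52:
--         letters = 'abcdefghijklmnopqrstuvwxyzABCDEFGHIJKLMNOPQRSTUVWXYZ'[:d]
--     else:
--         letters = [f'x{i}' for i in range(d)]
--     result = [None] * d
--     for i in range(d):
--         place = pi[i]
--         result[d - 1 - place] = letters[i]
--     if d > 52:
--         return ' '.join(result)
--     return ''.join(result)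
-- ===== SOURCE B (Python) =====
-- def pi_to_letter_string(pi, d):
--     """Return the letter string for pi: reading from highest place to lowest."""
--     if d <= 52:
--         letters = 'abcdefghijklmnopqrstuvwxyzABCDEFGHIJKLMNOPQRSTUVWXYZ'[:d]
--     else:
--         letters = [f'x{i}' for i in range(d)]
--     pos = {pi[i]: i for i in range(d)}
--     sep = ' ' if d > 52 else ''
--     return sep.join(letters[pos[d - 1 - j]] for j in range(d))
-- ===== Notes on version B (the rewrite author's own statement) =====
-- stated objective: alternative
-- what changed: Replaces A's scatter into a preallocated result array via negative-offset index arithmetic (result[d-1-place] = letters[i]) with a hash index built once (pos = {pi[i]: i}) and a gather by output position, joining letters[pos[d-1-j]] directly with no intermediate result list.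
-- outside the precondition, e.g. on pi_to_letter_string([2, 3], 2): A returns 'ba', B raises KeyError
import Mathlib
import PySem

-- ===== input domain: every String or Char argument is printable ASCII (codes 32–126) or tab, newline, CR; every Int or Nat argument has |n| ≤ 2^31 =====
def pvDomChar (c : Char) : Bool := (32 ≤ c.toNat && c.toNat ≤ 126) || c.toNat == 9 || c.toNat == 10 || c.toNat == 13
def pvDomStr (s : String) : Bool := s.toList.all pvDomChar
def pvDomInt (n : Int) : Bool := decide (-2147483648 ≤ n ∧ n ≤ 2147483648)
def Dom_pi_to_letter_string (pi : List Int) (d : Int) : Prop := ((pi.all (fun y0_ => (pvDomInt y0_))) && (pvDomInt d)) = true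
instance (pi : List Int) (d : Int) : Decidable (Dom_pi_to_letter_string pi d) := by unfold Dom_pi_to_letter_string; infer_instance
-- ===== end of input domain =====

-- B replaces A's scatter into a preallocated result array (result[d-1-place] = letters[i])
-- with a hash index pos = {pi[i]: i} built once and a direct gather by output position;
-- same cost, different data structure and traversal (objective: alternative).

-- ===== PORT A =====
-- shared helper: the 'letters' selection, identical in both Pythons
def pvLetters (d : Int) : List String :=
  if d ≤ 52 then
    (PySem.List.slice "abcdefghijklmnopqrstuvwxyzABCDEFGHIJKLMNOPQRSTUVWXYZ".toList
        none (some d)).map (fun c => String.ofList [c])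
  else
    (PySem.List.pyRange 0 d 1).map (fun i => String.ofList ('x' :: PySem.Int.toChars i))

def pi_to_letter_string (pi : List Int) (d : Int) : String :=
  let letters := pvLetters d
  -- for i in range(d): place = pi[i]; result[d - 1 - place] = letters[i]
  -- pyGetD/pySetD are exact here under Pre_ (index in range; Pre_ excludes the raising inputs)
  let result := (PySem.List.pyRange 0 d 1).foldl
    (fun result i =>
      let place := PySem.List.pyGetD pi i 0
      PySem.List.pySetD result (d - 1 - place) (some (PySem.List.pyGetD letters i "")))
    (List.replicate d.toNat none)
  match result.mapM id with
  | some parts => PySem.Str.join (if d > 52 then " " else "") parts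
  | none => ""  -- ''.join over a None hole is a TypeError; Pre_ excludes these inputs

-- ===== PORT B =====
def pi_to_letter_string_alt (pi : List Int) (d : Int) : String :=
  let letters := pvLetters d
  -- pos = {pi[i]: i for i in range(d)}   (pyGetD exact under Pre_: index in range)
  let pos := (PySem.List.pyRange 0 d 1).foldl
    (fun dct i => dct.insert (PySem.List.pyGetD pi i 0) i)
    (PySem.Dict.mk ([] : List (Int × Int)))
  let sep := if d > 52 then " " else ""
  PySem.Str.join sep ((PySem.List.pyRange 0 d 1).map (fun j =>
    match pos.get? (d - 1 - j) with
    | some i => PySem.List.pyGetD letters i ""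
    | none => ""))  -- KeyError in Python; Pre_ excludes these inputs

-- ===== PRECONDITION & SPEC =====
-- Pre_ admits exactly the inputs where A returns normally except the accidental wrap cases:
-- A raises IndexError when pi is shorter than d, and TypeError (joining None) when a result
-- slot stays empty; additionally Pre_ excludes inputs where some pi[i] ∉ [0, d) yet A still
-- returns a string only because result[d-1-pi[i]] wrapped around a negative index — an
-- artefact of Python's negative indexing that B (a plain key lookup) does not reproduce.
def Pre_pi_to_letter_string (pi : List Int) (d : Int) : Prop :=
  d ≤ 0 ∨ (d ≤ pi.length ∧ (pi.take d.toNat).Nodup ∧ ∀ x ∈ pi.take d.toNat, 0 ≤ x ∧ x < d)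
instance (pi : List Int) (d : Int) : Decidable (Pre_pi_to_letter_string pi d) := by
  unfold Pre_pi_to_letter_string; infer_instance

def pvWitness_pi_to_letter_string : List Int × Int := ([1, 0, 2], 3)

def Spec_pi_to_letter_string (pi : List Int) (d : Int) (out : String) : Prop := out = pi_to_letter_string_alt pi d
instance (pi : List Int) (d : Int) (out : String) : Decidable (Spec_pi_to_letter_string pi d out) := by unfold Spec_pi_to_letter_string; infer_instance

-- ===== CLAIM (what is proved, stated in full; the proofs are below) =====
def Claim_equal_pi_to_letter_string : Prop := ∀ (pi : List Int) (d : Int), Dom_pi_to_letter_string pi d → Pre_pi_to_letter_string pi d → Spec_pi_to_letter_string pi d (pi_to_letter_string pi d)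

-- ===== LEMMAS AND PROOFS =====

-- the witness satisfies Dom and Pre
theorem pvWitness_ok :
    Dom_pi_to_letter_string pvWitness_pi_to_letter_string.1 pvWitness_pi_to_letter_string.2 ∧
    Pre_pi_to_letter_string pvWitness_pi_to_letter_string.1 pvWitness_pi_to_letter_string.2 := by
  constructor
  · decide
  · right; refine ⟨by decide, by decide, by decide⟩

-- scatter loop: length is preserved
theorem scatter_length {α : Type} (g : Nat → Nat) (v : Nat → α) :
    ∀ (L : List Nat) (acc : List (Option α)),
      (L.foldl (fun a k => a.set (g k) (some (v k))) acc).length = acc.length := by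
  intro L
  induction L with
  | nil => intro acc; rfl
  | cons a L ih => intro acc; simp [List.foldl_cons, ih]

-- scatter loop: positions never written keep their initial value
theorem scatter_skip {α : Type} (g : Nat → Nat) (v : Nat → α) :
    ∀ (L : List Nat) (acc : List (Option α)) (j : Nat), (∀ k ∈ L, g k ≠ j) →
      (L.foldl (fun a k => a.set (g k) (some (v k))) acc)[j]? = acc[j]? := by
  intro L
  induction L with
  | nil => intro acc j _; rfl
  | cons a L ih =>
    intro acc j h
    simp only [List.foldl_cons]
    rw [ih _ j (fun k hk => h k (List.mem_cons_of_mem a hk))]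
    exact List.getElem?_set_ne (h a (List.mem_cons_self))

-- scatter loop: a position written exactly once holds that value at the end
theorem scatter_get {α : Type} (g : Nat → Nat) (v : Nat → α) :
    ∀ (L : List Nat) (acc : List (Option α)) (j i₀ : Nat),
      (L.map g).Nodup → i₀ ∈ L → g i₀ = j → j < acc.length →
      (L.foldl (fun a k => a.set (g k) (some (v k))) acc)[j]? = some (some (v i₀)) := by
  intro L
  induction L with
  | nil => intro acc j i₀ _ h; cases h
  | cons a L ih =>
    intro acc j i₀ hnd hmem hg hj
    simp only [List.map_cons, List.nodup_cons] at hnd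
    simp only [List.foldl_cons]
    rcases List.mem_cons.mp hmem with rfl | hmem'
    · -- written first; never written again since g i₀ ∉ L.map g
      rw [scatter_skip g v L _ j
          (fun k hk hgk => hnd.1 (by rw [hg, ← hgk]; exact List.mem_map_of_mem hk))]
      subst hg
      exact List.getElem?_set_self hj
    · exact ih _ j i₀ hnd.2 hmem' hg (by simpa using hj)

-- dict-build loop: keys never inserted keep their initial binding
theorem dictfold_skip (key val : Nat → Int) :
    ∀ (L : List Nat) (dct : PySem.Dict Int Int) (q : Int), (∀ k ∈ L, key k ≠ q) →
      (L.foldl (fun dd k => dd.insert (key k) (val k)) dct).get? q = dct.get? q := by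
  intro L
  induction L with
  | nil => intro dct q _; rfl
  | cons a L ih =>
    intro dct q h
    simp only [List.foldl_cons]
    rw [ih _ q (fun k hk => h k (List.mem_cons_of_mem a hk))]
    exact PySem.Dict.get?_insert_of_ne _ _ (fun he => h a List.mem_cons_self he.symm)

-- dict-build loop: a key inserted exactly once maps to its value at the end
theorem dictfold_get (key val : Nat → Int) :
    ∀ (L : List Nat) (dct : PySem.Dict Int Int) (q : Int) (i₀ : Nat),
      (L.map key).Nodup → i₀ ∈ L → key i₀ = q →
      (L.foldl (fun dd k => dd.insert (key k) (val k)) dct).get? q = some (val i₀) := by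
  intro L
  induction L with
  | nil => intro dct q i₀ _ h; cases h
  | cons a L ih =>
    intro dct q i₀ hnd hmem hk
    simp only [List.map_cons, List.nodup_cons] at hnd
    simp only [List.foldl_cons]
    rcases List.mem_cons.mp hmem with rfl | hmem'
    · rw [dictfold_skip key val L _ q (fun k hkL hke => hnd.1 (hk ▸ hke ▸ List.mem_map_of_mem hkL))]
      rw [← hk, PySem.Dict.get?_insert_self]
    · exact ih _ q i₀ hnd.2 hmem' hk

-- under Pre_ (0 < d), every value in [0, d) occurs among the first d entries of pi
theorem perm_surj (pi : List Int) (d : Int) (hlen : d ≤ (pi.length : Int))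
    (hnd : (pi.take d.toNat).Nodup) (hmem : ∀ x ∈ pi.take d.toNat, 0 ≤ x ∧ x < d)
    (w : Int) (hw0 : 0 ≤ w) (hwd : w < d) :
    ∃ i : Nat, i < d.toNat ∧ ∃ hi : i < pi.length, pi[i] = w := by
  have hn : d.toNat ≤ pi.length := by omega
  have hlent : (pi.take d.toNat).length = d.toNat := by simp [List.length_take]; omega
  have hsub : (pi.take d.toNat).toFinset ⊆ Finset.Ico (0 : Int) d := by
    intro x hx
    rcases hmem x (List.mem_toFinset.mp hx) with ⟨h1, h2⟩
    exact Finset.mem_Ico.mpr ⟨h1, h2⟩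
  have hcard : (Finset.Ico (0 : Int) d).card ≤ (pi.take d.toNat).toFinset.card := by
    rw [List.toFinset_card_of_nodup hnd, hlent]; simp
  have heq := Finset.eq_of_subset_of_card_le hsub hcard
  have hwmem : w ∈ (pi.take d.toNat).toFinset := by
    rw [heq]; exact Finset.mem_Ico.mpr ⟨hw0, hwd⟩
  rcases List.getElem_of_mem (List.mem_toFinset.mp hwmem) with ⟨i, hi, hieq⟩
  refine ⟨i, by omega, by omega, ?_⟩
  simpa using hieq

-- getD coincides with getElem in range
theorem getD_in_range (pi : List Int) (i : Nat) (hi : i < pi.length) :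
    pi.getD i 0 = pi[i] := List.getD_eq_getElem pi 0 hi

theorem main_equiv (pi : List Int) (d : Int) (hpre : Pre_pi_to_letter_string pi d) :
    pi_to_letter_string pi d = pi_to_letter_string_alt pi d := by
  by_cases hd : d ≤ 0
  · -- range(d) is empty, [None]*d is empty: both sides are the empty join
    have h0 : d.toNat = 0 := by omega
    simp [pi_to_letter_string, pi_to_letter_string_alt,
      PySem.List.pyRange_one_eq_nil hd, h0, List.mapM, List.mapM.loop]
  · have hd' : 0 < d := by omega
    rcases hpre with h | ⟨hlen, hnd, hmem⟩
    · omega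
    have hnlen : d.toNat ≤ pi.length := by omega
    have htakelen : (pi.take d.toNat).length = d.toNat := by
      simp [List.length_take]; omega
    have hval : ∀ k, k < d.toNat → 0 ≤ pi.getD k 0 ∧ pi.getD k 0 < d := by
      intro k hk
      have hkl : k < pi.length := by omega
      have hkt : k < (pi.take d.toNat).length := by omega
      have hmem' := hmem ((pi.take d.toNat)[k]) (List.getElem_mem hkt)
      rw [getD_in_range pi k hkl]
      simpa using hmem'
    have hinj : ∀ x, x < d.toNat → ∀ y, y < d.toNat → pi.getD x 0 = pi.getD y 0 → x = y := by
      intro x hx y hy hxy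
      rw [getD_in_range pi x (by omega), getD_in_range pi y (by omega)] at hxy
      have h1 : (pi.take d.toNat)[x]'(by omega) = (pi.take d.toNat)[y]'(by omega) := by
        simpa using hxy
      exact (List.Nodup.getElem_inj_iff hnd).mp h1
    have hkeynodup : ((List.range d.toNat).map (fun k => pi.getD k 0)).Nodup :=
      List.Nodup.map_on
        (fun x hx y hy h => hinj x (List.mem_range.mp hx) y (List.mem_range.mp hy) h)
        (List.nodup_range)
    have hgnodup : ((List.range d.toNat).map (fun k => (d - 1 - pi.getD k 0).toNat)).Nodup := by
      apply List.Nodup.map_on ?_ List.nodup_range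
      intro x hx y hy h
      have hx' := List.mem_range.mp hx
      have hy' := List.mem_range.mp hy
      rcases hval x hx' with ⟨a1, a2⟩
      rcases hval y hy' with ⟨b1, b2⟩
      exact hinj x hx' y hy' (by omega)
    have hexists : ∀ j, j < d.toNat → ∃ i, i < d.toNat ∧ pi.getD i 0 = d - 1 - (j : Int) := by
      intro j hj
      have hjd : (j : Int) < d := by omega
      obtain ⟨i, hi1, hi2, hi3⟩ :=
        perm_surj pi d hlen hnd hmem (d - 1 - (j : Int)) (by omega) (by omega)
      exact ⟨i, hi1, by rw [getD_in_range pi i hi2]; exact hi3⟩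
    -- the (identical) gather list both ports produce
    have hR : (List.range d.toNat).foldl
          (fun acc k => acc.set ((d - 1 - pi.getD k 0).toNat) (some ((pvLetters d).getD k "")))
          (List.replicate d.toNat (none : Option String))
        = ((List.range d.toNat).map (fun (j : Nat) =>
            match ((List.range d.toNat).foldl
                (fun dct k => dct.insert (pi.getD k 0) ((k : Int)))
                (PySem.Dict.mk ([] : List (Int × Int)))).get? (d - 1 - (j : Int)) with
            | some i => PySem.List.pyGetD (pvLetters d) i ""
            | none => "")).map some := by
      apply List.ext_getElem?
      intro j
      by_cases hj : j < d.toNat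
      · obtain ⟨i₀, hi₀, hpi⟩ := hexists j hj
        rw [scatter_get (fun k => (d - 1 - pi.getD k 0).toNat) (fun k => (pvLetters d).getD k "")
              _ _ j i₀ hgnodup (List.mem_range.mpr hi₀) (by show (d - 1 - pi.getD i₀ 0).toNat = j; rw [hpi]; omega) (by simpa using hj)]
        rw [List.getElem?_map, List.getElem?_map, List.getElem?_range hj]
        simp only [Option.map_some]
        rw [dictfold_get (fun k => pi.getD k 0) (fun (k : Nat) => ((k : Int)))
              _ _ _ i₀ hkeynodup (List.mem_range.mpr hi₀) hpi]
        simp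
      · have l1 : ((List.range d.toNat).foldl
            (fun acc k => acc.set ((d - 1 - pi.getD k 0).toNat) (some ((pvLetters d).getD k "")))
            (List.replicate d.toNat (none : Option String))).length = d.toNat := by
          rw [scatter_length]; simp
        rw [List.getElem?_eq_none (by omega), List.getElem?_eq_none (by simp; omega)]
    have hfold_congr : (List.range d.toNat).foldl
          (fun acc k => PySem.List.pySetD acc (d - 1 - pi.getD k 0) (some ((pvLetters d).getD k "")))
          (List.replicate d.toNat (none : Option String))
        = (List.range d.toNat).foldl
          (fun acc k => acc.set ((d - 1 - pi.getD k 0).toNat) (some ((pvLetters d).getD k "")))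
          (List.replicate d.toNat (none : Option String)) := by
      apply PySem.List.foldl_congr_mem
      intro acc k hk
      rcases hval k (List.mem_range.mp hk) with ⟨h1, h2⟩
      exact PySem.List.pySetD_of_nonneg _ _ (by omega)
    have e1 : pi_to_letter_string pi d =
        PySem.Str.join (if d > 52 then " " else "")
          ((List.range d.toNat).map (fun (j : Nat) =>
            match ((List.range d.toNat).foldl
                (fun dct k => dct.insert (pi.getD k 0) ((k : Int)))
                (PySem.Dict.mk ([] : List (Int × Int)))).get? (d - 1 - (j : Int)) with
            | some i => PySem.List.pyGetD (pvLetters d) i ""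
            | none => "")) := by
      unfold pi_to_letter_string
      rw [PySem.List.pyRange_one]
      simp only [List.foldl_map, zero_add, sub_zero, PySem.List.pyGetD_natCast]
      rw [hfold_congr, hR]
      have hmapM : ∀ (l : List String), (l.map some).mapM id = some l := by
        intro l
        induction l with
        | nil => rfl
        | cons a t ih => simp [List.mapM_cons, ih]
      rw [hmapM]
    have e2 : pi_to_letter_string_alt pi d =
        PySem.Str.join (if d > 52 then " " else "")
          ((List.range d.toNat).map (fun (j : Nat) =>
            match ((List.range d.toNat).foldl
                (fun dct k => dct.insert (pi.getD k 0) ((k : Int)))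
                (PySem.Dict.mk ([] : List (Int × Int)))).get? (d - 1 - (j : Int)) with
            | some i => PySem.List.pyGetD (pvLetters d) i ""
            | none => "")) := by
      unfold pi_to_letter_string_alt
      rw [PySem.List.pyRange_one]
      simp only [List.foldl_map, List.map_map, Function.comp_def, zero_add, sub_zero,
        PySem.List.pyGetD_natCast]
    rw [e1, e2]

-- ===== VERDICT (by name: the statement is the Claim_ definition above) =====
theorem pi_to_letter_string_spec : Claim_equal_pi_to_letter_string := by
  intro pi d _hdom hpre
  unfold Spec_pi_to_letter_string
  exact main_equiv pi d hpre
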